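-- pv_equiv track=rewrite | github.com/gorkaerana/meddle | src/meddle/parser.py | mark_first_and_last
-- ===== SOURCE A (Python) =====
-- from collections import deque
-- from typing import Any, Callable, Generator, Iterable, Literal, TypeAlias, overload
--
-- def mark_first_and_last(
--     iterable: Iterable,
-- ) -> Generator[tuple[bool, bool, Any], None, None]:
--     """Given an `iterable`, flag its first and last elements. E.g.
--     >>> list(mark_first_and_last(range(3)))
--     >>> [(True, False, 0), (False, False, 1), (False, True, 2)]
--     """
--     iterable = iter(iterable)
--     buffer_ = deque([(True, False, next(iterable))], maxlen=1)
--     while True: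
--         try:
--             next_value = next(iterable)
--             yield buffer_.pop()
--             buffer_.append((False, False, next_value))
--         except StopIteration:
--             *_, value = buffer_.pop()
--             yield (False, True, value)
--             break
-- ===== SOURCE B (Python) =====
-- def mark_first_and_last(iterable):
--     """Flag the first and last elements of `iterable`."""
--     xs = list(iterable)
--     n = len(xs)
--     for i, x in enumerate(xs):
--         yield (i == 0, i == n - 1, x)
-- ===== Notes on version B (the rewrite author's own statement) =====
-- stated objective: simpler
-- what changed: Replaces the deque-of-one lookahead generator with a materialize-then-enumerate pass computing each element's flags directly from its index and the length; Pre_ excludes the empty iterable, on which A raises RuntimeError.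
-- intended difference: On single-element iterables A returns [(False, True, x)] — the lone element is not flagged as first — while B returns [(True, True, x)]; flagging the sole element as both first and last is the intended behaviour of a first/last marker. — e.g. on mark_first_and_last([5]): A returns [(false, true, 5)], B returns [(true, true, 5)]
import Mathlib
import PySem

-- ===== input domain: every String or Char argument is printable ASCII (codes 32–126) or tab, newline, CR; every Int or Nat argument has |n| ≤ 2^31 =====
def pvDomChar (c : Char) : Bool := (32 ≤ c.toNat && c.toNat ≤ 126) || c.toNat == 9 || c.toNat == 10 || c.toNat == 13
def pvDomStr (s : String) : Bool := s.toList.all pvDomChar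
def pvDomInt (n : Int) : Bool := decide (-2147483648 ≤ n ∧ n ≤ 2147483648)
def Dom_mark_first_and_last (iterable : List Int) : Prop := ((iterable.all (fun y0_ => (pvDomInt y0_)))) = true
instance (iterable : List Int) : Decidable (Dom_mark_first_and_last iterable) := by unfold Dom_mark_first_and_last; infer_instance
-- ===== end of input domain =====

-- B replaces A's deque-of-one lookahead generator with a materialize-then-enumerate pass
-- computing flags from index and length (objective: simpler); on a singleton B marks the
-- element as both first and last where A leaves the first flag unset (stated via D_).


-- ===== PORT A =====
-- the while-true loop: buffer holds one pending triple; on a next value, yield the buffer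
-- and refill it; on StopIteration, yield (False, True, buffered value) and stop
def markA_loop (buf : Bool × Bool × Int) : List Int → List (Bool × Bool × Int)
  | [] => [(false, true, buf.2.2)]
  | v :: rest => buf :: markA_loop (false, false, v) rest

def mark_first_and_last (iterable : List Int) : List (Bool × Bool × Int) :=
  match iterable with
  | [] => []   -- next(iterable) raises: excluded by Pre_
  | x :: rest => markA_loop (true, false, x) rest

-- ===== PORT B =====
-- the for-loop over enumerate(xs), with n = len(xs) fixed up front
def markB_loop (n : Nat) (i : Nat) : List Int → List (Bool × Bool × Int)
  | [] => []
  | x :: rest => (decide (i = 0), decide (i = n - 1), x) :: markB_loop n (i + 1) rest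

def mark_first_and_last_alt (iterable : List Int) : List (Bool × Bool × Int) :=
  markB_loop iterable.length 0 iterable

-- ===== PRECONDITION & SPEC =====
-- A raises RuntimeError on the empty iterable (next on an exhausted iterator inside a generator)
def Pre_mark_first_and_last (iterable : List Int) : Prop := iterable ≠ []
instance (iterable : List Int) : Decidable (Pre_mark_first_and_last iterable) := by unfold Pre_mark_first_and_last; infer_instance
def pvWitness_mark_first_and_last : List Int := [3, 1, 2]

-- On single-element iterables A returns [(False, True, x)] — the lone element is not flagged
-- as first — while B returns [(True, True, x)]; flagging the sole element as both first and
-- last is the intended behaviour of a first/last marker.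
def D_mark_first_and_last (iterable : List Int) : Prop := iterable.length = 1
instance (iterable : List Int) : Decidable (D_mark_first_and_last iterable) := by unfold D_mark_first_and_last; infer_instance

def Spec_mark_first_and_last (iterable : List Int) (out : List (Bool × Bool × Int)) : Prop := ¬ D_mark_first_and_last iterable → out = mark_first_and_last_alt iterable
instance (iterable : List Int) (out : List (Bool × Bool × Int)) : Decidable (Spec_mark_first_and_last iterable out) := by unfold Spec_mark_first_and_last; infer_instance

def pvDiffWitness_mark_first_and_last : List Int := [5]
def pvDiffWitnessOut_mark_first_and_last : (List (Bool × Bool × Int)) × (List (Bool × Bool × Int)) := ([(false, true, 5)], [(true, true, 5)])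

-- ===== CLAIM (what is proved, stated in full; the proofs are below) =====
def Claim_unchanged_mark_first_and_last : Prop := ∀ (iterable : List Int), Dom_mark_first_and_last iterable → Pre_mark_first_and_last iterable → Spec_mark_first_and_last iterable (mark_first_and_last iterable)
def Claim_changed_mark_first_and_last : Prop := Dom_mark_first_and_last (pvDiffWitness_mark_first_and_last) ∧ Pre_mark_first_and_last (pvDiffWitness_mark_first_and_last) ∧ D_mark_first_and_last (pvDiffWitness_mark_first_and_last) ∧ mark_first_and_last (pvDiffWitness_mark_first_and_last) = pvDiffWitnessOut_mark_first_and_last.1 ∧ mark_first_and_last_alt (pvDiffWitness_mark_first_and_last) = pvDiffWitnessOut_mark_first_and_last.2 ∧ pvDiffWitnessOut_mark_first_and_last.1 ≠ pvDiffWitnessOut_mark_first_and_last.2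
def Claim_exact_mark_first_and_last : Prop := ∀ (iterable : List Int), Dom_mark_first_and_last iterable → Pre_mark_first_and_last iterable → D_mark_first_and_last iterable → mark_first_and_last iterable ≠ mark_first_and_last_alt iterable

-- ===== LEMMAS AND PROOFS =====
-- from index j ≥ 1 on, A's buffered triples coincide with B's indexed flags
theorem markA_loop_eq_markB (t : List Int) : ∀ (v : Int) (j n : Nat), 1 ≤ j → n = j + t.length + 1 →
    markA_loop (false, false, v) t = markB_loop n j (v :: t) := by
  induction t with
  | nil =>
    intro v j n hj hn
    simp only [List.length_nil] at hn
    simp [markA_loop, markB_loop]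
    omega
  | cons w t ih =>
    intro v j n hj hn
    have h1 : markA_loop (false, false, v) (w :: t) = (false, false, v) :: markA_loop (false, false, w) t := rfl
    rw [h1, ih w (j + 1) n (by omega) (by simp only [List.length_cons] at hn ⊢; omega)]
    have hj0 : ¬ (j = 0) := by omega
    have hjn : ¬ (j = n - 1) := by simp [List.length] at hn; omega
    simp [markB_loop, hj0, hjn]

-- ===== VERDICT (by name: the statement is the Claim_ definition above) =====
theorem mark_first_and_last_spec : Claim_unchanged_mark_first_and_last := by
  intro iterable _ hpre hD
  match iterable with
  | [] => exact absurd rfl hpre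
  | [x] => exact absurd rfl hD
  | x :: w :: t =>
    show markA_loop (true, false, x) (w :: t) = mark_first_and_last_alt (x :: w :: t)
    have h1 : markA_loop (true, false, x) (w :: t) = (true, false, x) :: markA_loop (false, false, w) t := rfl
    rw [h1, mark_first_and_last_alt]
    rw [markA_loop_eq_markB t w 1 ((x :: w :: t).length) (le_refl 1) (by simp only [List.length_cons]; omega)]
    simp [markB_loop]

theorem mark_first_and_last_changed : Claim_changed_mark_first_and_last := by
  unfold Claim_changed_mark_first_and_last; decide

theorem mark_first_and_last_tight : Claim_exact_mark_first_and_last := by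
  intro iterable _ _ hD
  match iterable with
  | [x] =>
    simp [mark_first_and_last, mark_first_and_last_alt, markA_loop, markB_loop]
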